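-- pv_equiv track=rewrite | github.com/Automation-Course/Automation_Course_2025B | EX1/Group17/GIT_GROUP17.py | decimal_to_hex
-- ===== SOURCE A (Python) =====
-- def decimal_to_hex(decimal_str):
--     hex_digits = "0123456789ABCDEF"  # ערכים הקסדצימליים
--     hex_value = ""
--     while decimal_str > 0:
--         remainder = decimal_str % 16  # חישוב שארית (הסיפרה ההקסדצימלית)
--         hex_value = hex_digits[remainder] + hex_value  # הוספת הסיפרה לתוצאה
--         decimal_str //= 16  # חלוקה שלמה ב-16 להמשך ההמרה
--
--     return hex_value if hex_value else "0"  # אם המספר הוא 0, מחזירים "0"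
-- ===== SOURCE B (Python) =====
-- def decimal_to_hex(decimal_str):
--     hex_digits = "0123456789ABCDEF"
--     if decimal_str <= 0:
--         return "0"
--     # find the largest power of 16 not exceeding the number
--     p = 1
--     while p * 16 <= decimal_str:
--         p *= 16
--     # emit digits most-significant first by dividing by descending powers
--     out = []
--     while p > 0:
--         out.append(hex_digits[(decimal_str // p) % 16])
--         p //= 16
--     return "".join(out)
-- ===== Notes on version B (the rewrite author's own statement) =====
-- stated objective: alternative
-- what changed: Instead of A's while loop that prepends the low digit and iterates on n // 16, B first finds the highest power of 16 not exceeding n and then emits digits most-significant first by dividing by descending powers, appending to a list joined at the end.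
import Mathlib
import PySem

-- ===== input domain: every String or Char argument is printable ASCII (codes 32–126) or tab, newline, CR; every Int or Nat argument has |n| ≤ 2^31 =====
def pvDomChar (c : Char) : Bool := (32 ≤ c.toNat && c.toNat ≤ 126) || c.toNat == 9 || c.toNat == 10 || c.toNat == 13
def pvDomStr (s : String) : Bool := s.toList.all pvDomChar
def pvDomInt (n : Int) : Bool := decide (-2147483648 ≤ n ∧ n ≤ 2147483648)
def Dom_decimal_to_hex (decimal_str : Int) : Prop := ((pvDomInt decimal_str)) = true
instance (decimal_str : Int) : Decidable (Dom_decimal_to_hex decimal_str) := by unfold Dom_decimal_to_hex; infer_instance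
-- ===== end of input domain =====

-- B replaces A's low-to-high digit loop (prepend onto an accumulator, iterate on n // 16) with a
-- two-phase scheme: find the highest power of 16 ≤ n, then emit digits most-significant first by
-- dividing by descending powers; same values everywhere, no speed claim.

-- ===== PORT A =====
-- the hex_digits lookup string, as chars (strings are ported through List Char)
def pvHexDigits : List Char := "0123456789ABCDEF".toList

-- A's while loop: prepend the digit for n % 16, continue with n // 16
-- (the index n % 16 is always in 0..15 here since n > 0, so the pyGetD default is never used)
def pvALoop (n : Int) (acc : List Char) : List Char :=
  if h : 0 < n then
    pvALoop (PySem.Int.floordiv n 16)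
      (PySem.List.pyGetD pvHexDigits (PySem.Int.mod n 16) ' ' :: acc)
  else acc
termination_by n.toNat
decreasing_by
  have hdm := Int.mul_ediv_add_emod n 16
  have hm0 := Int.emod_nonneg n (by norm_num : (16:Int) ≠ 0)
  have hml := Int.emod_lt_of_pos n (by norm_num : (0:Int) < 16)
  rw [PySem.Int.floordiv_eq_ediv_of_pos (by omega)]; omega

def decimal_to_hex (decimal_str : Int) : String :=
  let hex_value := pvALoop decimal_str []
  if hex_value = [] then "0" else String.ofList hex_value

-- ===== PORT B =====
-- B's first loop: p = 1; while p * 16 <= n: p *= 16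
def pvFindPow (n p : Int) : Int :=
  -- the 0 < p conjunct only makes the recursion total; B calls this with p = 1, so it always holds
  if h : 0 < p ∧ p * 16 ≤ n then pvFindPow n (p * 16) else p
termination_by (n - p).toNat
decreasing_by omega

-- B's second loop: while p > 0: append hex_digits[(n // p) % 16]; p //= 16
def pvEmit (n p : Int) (out : List Char) : List Char :=
  if h : 0 < p then
    pvEmit n (PySem.Int.floordiv p 16)
      (out ++ [PySem.List.pyGetD pvHexDigits (PySem.Int.mod (PySem.Int.floordiv n p) 16) ' '])
  else out
termination_by p.toNat
decreasing_by
  have hdm := Int.mul_ediv_add_emod p 16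
  have hm0 := Int.emod_nonneg p (by norm_num : (16:Int) ≠ 0)
  have hml := Int.emod_lt_of_pos p (by norm_num : (0:Int) < 16)
  rw [PySem.Int.floordiv_eq_ediv_of_pos (by omega)]; omega

def decimal_to_hex_alt (decimal_str : Int) : String :=
  if decimal_str ≤ 0 then "0"
  else String.ofList (pvEmit decimal_str (pvFindPow decimal_str 1) [])

-- ===== PRECONDITION & SPEC =====
def Spec_decimal_to_hex (decimal_str : Int) (out : String) : Prop := out = decimal_to_hex_alt decimal_str
instance (decimal_str : Int) (out : String) : Decidable (Spec_decimal_to_hex decimal_str out) := by unfold Spec_decimal_to_hex; infer_instance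

-- ===== CLAIM (what is proved, stated in full; the proofs are below) =====
def Claim_equal_decimal_to_hex : Prop := ∀ (decimal_str : Int), Dom_decimal_to_hex decimal_str → Spec_decimal_to_hex decimal_str (decimal_to_hex decimal_str)

-- ===== LEMMAS AND PROOFS =====

-- proof-side reference: the hex digit list of n, built low digit last
def pvH (n : Int) : List Char :=
  if h : 0 < n then
    pvH (n / 16) ++ [PySem.List.pyGetD pvHexDigits (n % 16) ' ']
  else []
termination_by n.toNat
decreasing_by omega

theorem pvALoop_eq (n : Int) (acc : List Char) : pvALoop n acc = pvH n ++ acc := by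
  rw [pvALoop, pvH]
  by_cases hn : 0 < n
  · simp only [dif_pos hn]
    rw [pvALoop_eq, PySem.Int.floordiv_eq_ediv_of_pos (by norm_num),
        PySem.Int.mod_eq_emod_of_pos (by norm_num)]
    simp
  · simp [dif_neg hn]
termination_by n.toNat
decreasing_by
  rw [PySem.Int.floordiv_eq_ediv_of_pos (by norm_num)]; omega

-- the (k+1)-digit padded representation of n, most significant first
def pvP (k : Nat) (n : Int) : List Char :=
  match k with
  | 0 => [PySem.List.pyGetD pvHexDigits (n % 16) ' ']
  | k + 1 => PySem.List.pyGetD pvHexDigits ((n / 16 ^ (k + 1)) % 16) ' ' :: pvP k n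

theorem pvP_succ (k : Nat) (n : Int) (hn : 0 ≤ n) :
    pvP (k + 1) n = pvP k (n / 16) ++ [PySem.List.pyGetD pvHexDigits (n % 16) ' '] := by
  induction k with
  | zero => simp [pvP]
  | succ k ih =>
    have hdd : n / 16 ^ (k + 2) = (n / 16) / 16 ^ (k + 1) := by
      rw [Int.ediv_ediv_of_nonneg]
      · ring_nf
      · norm_num
    rw [pvP, ih, pvP]
    simp [hdd, pvP]

theorem pvEmit_eq (k : Nat) (n : Int) (out : List Char) (hn : 0 ≤ n) :
    pvEmit n (16 ^ k) out = out ++ pvP k n := by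
  induction k generalizing out with
  | zero =>
    rw [pvEmit]
    simp only [pow_zero, dif_pos (by norm_num : (0:Int) < 1)]
    rw [pvEmit]
    rw [PySem.Int.floordiv_eq_ediv_of_pos (by norm_num : (0:Int) < 16),
        PySem.Int.floordiv_eq_ediv_of_pos (by norm_num : (0:Int) < 1),
        PySem.Int.mod_eq_emod_of_pos (by norm_num : (0:Int) < 16)]
    simp [pvP]
  | succ k ih =>
    rw [pvEmit]
    have hp : (0:Int) < 16 ^ (k + 1) := by positivity
    simp only [dif_pos hp]
    rw [PySem.Int.floordiv_eq_ediv_of_pos (by norm_num : (0:Int) < 16),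
        PySem.Int.floordiv_eq_ediv_of_pos hp,
        PySem.Int.mod_eq_emod_of_pos (by norm_num : (0:Int) < 16)]
    have h16 : (16:Int) ^ (k + 1) / 16 = 16 ^ k := by
      rw [pow_succ]
      exact Int.mul_ediv_cancel _ (by norm_num)
    rw [h16, ih]
    simp [pvP]

theorem pvP_eq_pvH (k : Nat) (n : Int) (h1 : 16 ^ k ≤ n) (h2 : n < 16 ^ (k + 1)) :
    pvP k n = pvH n := by
  induction k generalizing n with
  | zero =>
    simp only [pow_zero] at h1
    rw [pvP, pvH]
    simp only [dif_pos (by omega : (0:Int) < n)]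
    have : n / 16 = 0 := by omega
    rw [this, pvH]
    simp
  | succ k ih =>
    have hn : (0:Int) ≤ n := le_trans (by positivity) h1
    rw [pvP_succ _ _ hn, pvH]
    have hpos : (0:Int) < n := lt_of_lt_of_le (by positivity) h1
    simp only [dif_pos hpos]
    congr 1
    apply ih
    · rw [Int.le_ediv_iff_mul_le (by norm_num : (0:Int) < 16)]
      calc (16:Int) ^ k * 16 = 16 ^ (k + 1) := by ring
        _ ≤ n := h1
    · rw [Int.ediv_lt_iff_lt_mul (by norm_num : (0:Int) < 16)]
      calc n < 16 ^ (k + 2) := h2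
        _ = 16 ^ (k + 1) * 16 := by ring

theorem pvFindPow_spec (n p : Int) (hp : 0 < p) (hpn : p ≤ n) (hpow : ∃ j : Nat, p = 16 ^ j) :
    ∃ k : Nat, pvFindPow n p = 16 ^ k ∧ 16 ^ k ≤ n ∧ n < 16 ^ (k + 1) := by
  obtain ⟨j, rfl⟩ := hpow
  rw [pvFindPow]
  by_cases h : (16:Int) ^ j * 16 ≤ n
  · simp only [dif_pos (And.intro hp h)]
    have h16 : (16:Int) ^ j * 16 = 16 ^ (j + 1) := by ring
    rw [h16]
    exact pvFindPow_spec n (16 ^ (j + 1)) (by positivity) (by omega) ⟨j + 1, rfl⟩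
  · have hng : ¬ (0 < (16:Int) ^ j ∧ 16 ^ j * 16 ≤ n) := fun hc => h hc.2
    simp only [dif_neg hng]
    exact ⟨j, rfl, hpn, by omega⟩
termination_by (n - p).toNat
decreasing_by omega

theorem pvH_ne_nil (n : Int) (hn : 0 < n) : pvH n ≠ [] := by
  rw [pvH]; simp [dif_pos hn]

-- ===== VERDICT (by name: the statement is the Claim_ definition above) =====
theorem decimal_to_hex_spec : Claim_equal_decimal_to_hex := by
  intro n _
  unfold Spec_decimal_to_hex decimal_to_hex decimal_to_hex_alt
  by_cases hn : n ≤ 0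
  · rw [pvALoop_eq, pvH]
    simp [show ¬ (0:Int) < n by omega, hn]
  · obtain ⟨k, hk, h1, h2⟩ := pvFindPow_spec n 1 (by norm_num) (by omega) ⟨0, by norm_num⟩
    rw [pvALoop_eq, if_neg hn, hk, pvEmit_eq _ _ _ (by omega), pvP_eq_pvH _ _ h1 h2]
    simp [pvH_ne_nil n (by omega)]
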